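-- pv_equiv track=rewrite | github.com/mik11231/python | advent2017/extras/python/days/day21.py | split_blocks
-- ===== SOURCE A (Python) =====
-- def split_blocks(grid: tuple[str, ...], bs: int) -> list[tuple[str, ...]]:
--     """
--     Run `split_blocks` as a clearly documented algorithm stage.
--
--     Methodology:
--     - Treat this function as one deterministic step in the Advent pipeline.
--     - Keep parsing, state transitions, and result emission easy to audit.
--     - Favor explicit control flow so behavior can be reasoned about from docs alone.
--
--     Parameters: grid, bs.
--     - Returns the computed result for this stage of the pipeline.
--     """
--     n = len(grid)
--     cnt = n // bs
--     out: list[tuple[str, ...]] = []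
--     for br in range(cnt):
--         for bc in range(cnt):
--             out.append(tuple(grid[br * bs + r][bc * bs : bc * bs + bs] for r in range(bs)))
--     return out
-- ===== SOURCE B (Python) =====
-- def split_blocks(grid, bs):
--     cnt = len(grid) // bs
--     if cnt <= 0:
--         return []
--     blocks = [[] for _ in range(cnt * cnt)]
--     for i in range(cnt * bs):
--         br = i // bs
--         row = grid[i]
--         for bc in range(cnt):
--             blocks[br * cnt + bc].append(row[bc * bs : (bc + 1) * bs])
--     return [tuple(b) for b in blocks]
-- ===== Notes on version B (the rewrite author's own statement) =====
-- stated objective: alternative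
-- what changed: B preallocates cnt*cnt block accumulators and fills them in a single row-major pass over the grid rows (computing each row's block row as i//bs), instead of A's triple nested loop that re-indexes the grid block by block.
import Mathlib
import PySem

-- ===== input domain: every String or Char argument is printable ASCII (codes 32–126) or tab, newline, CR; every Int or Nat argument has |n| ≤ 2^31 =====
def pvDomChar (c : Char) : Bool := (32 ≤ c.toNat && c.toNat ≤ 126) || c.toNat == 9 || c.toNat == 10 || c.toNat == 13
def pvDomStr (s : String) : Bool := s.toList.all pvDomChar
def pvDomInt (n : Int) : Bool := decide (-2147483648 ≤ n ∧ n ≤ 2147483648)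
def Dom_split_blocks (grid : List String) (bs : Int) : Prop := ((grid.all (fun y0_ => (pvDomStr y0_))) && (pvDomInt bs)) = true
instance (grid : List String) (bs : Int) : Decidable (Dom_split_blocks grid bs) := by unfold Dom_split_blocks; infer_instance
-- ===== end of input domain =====

-- B splits the grid in a single row-major pass that appends each row slice to a
-- preallocated block accumulator, instead of A's block-by-block re-indexing
-- (objective: alternative decomposition, same asymptotic cost).

-- ===== PORT A =====
-- grid[br*bs+r] is always in range here (br*bs+r < cnt*bs ≤ len(grid)), so pyGetD is exact.
def split_blocks (grid : List String) (bs : Int) : List (List String) :=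
  let n : Int := grid.length
  let cnt : Int := PySem.Int.floordiv n bs
  (PySem.List.pyRange 0 cnt 1).foldl (fun out br =>
    (PySem.List.pyRange 0 cnt 1).foldl (fun out bc =>
      out ++ [(PySem.List.pyRange 0 bs 1).map (fun r =>
        PySem.Str.slice (PySem.List.pyGetD grid (br * bs + r) "") (some (bc * bs)) (some (bc * bs + bs)))]) out) []

-- ===== PORT B =====
-- In the non-trivial branch cnt > 0 forces bs > 0, so every index (i, br*cnt+bc) is
-- nonnegative and in range: .toNat and getD/pyGetD are exact there.  blocks[idx].append(x)
-- becomes set idx (getD idx [] ++ [x]); [tuple(b) for b in blocks] is the identity under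
-- the tuple-as-List convention.
def split_blocks_alt (grid : List String) (bs : Int) : List (List String) :=
  let cnt : Int := PySem.Int.floordiv (grid.length : Int) bs
  if cnt ≤ 0 then []
  else
    (PySem.List.pyRange 0 (cnt * bs) 1).foldl
      (fun blocks i =>
        let br : Int := PySem.Int.floordiv i bs
        let row : String := PySem.List.pyGetD grid i ""
        (PySem.List.pyRange 0 cnt 1).foldl
          (fun blocks bc =>
            blocks.set (br * cnt + bc).toNat
              (blocks.getD (br * cnt + bc).toNat [] ++
                [PySem.Str.slice row (some (bc * bs)) (some ((bc + 1) * bs))]))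
          blocks)
      (List.replicate (cnt * cnt).toNat ([] : List String))

-- ===== PRECONDITION & SPEC =====
-- Pre_ excludes exactly bs = 0, where Python A raises ZeroDivisionError (B raises there too).
def Pre_split_blocks (grid : List String) (bs : Int) : Prop := bs ≠ 0
instance (grid : List String) (bs : Int) : Decidable (Pre_split_blocks grid bs) := by unfold Pre_split_blocks; infer_instance
def pvWitness_split_blocks : List String × Int := (["abcd", "efgh", "ijkl", "mnop"], 2)

def Spec_split_blocks (grid : List String) (bs : Int) (out : List (List String)) : Prop := out = split_blocks_alt grid bs
instance (grid : List String) (bs : Int) (out : List (List String)) : Decidable (Spec_split_blocks grid bs out) := by unfold Spec_split_blocks; infer_instance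

-- ===== CLAIM (what is proved, stated in full; the proofs are below) =====
def Claim_equal_split_blocks : Prop := ∀ (grid : List String) (bs : Int), Dom_split_blocks grid bs → Pre_split_blocks grid bs → Spec_split_blocks grid bs (split_blocks grid bs)

-- ===== LEMMAS AND PROOFS =====

def pvPiece (grid : List String) (b : Nat) (i bc : Nat) : String :=
  PySem.Str.slice (PySem.List.pyGetD grid (i : Int) "") (some ((bc * b : Nat) : Int)) (some ((bc * b + b : Nat) : Int))

def pvBlk (grid : List String) (b : Nat) (br bc : Nat) : List String :=
  (List.range b).map (fun r => pvPiece grid b (br * b + r) bc)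

lemma pv_idx_inj {c br br' bc bc' : Nat} (h1 : bc < c) (h2 : bc' < c)
    (h : br * c + bc = br' * c + bc') : br = br' ∧ bc = bc' := by
  have hc : 0 < c := by omega
  have e1 : (br * c + bc) / c = br := by
    rw [Nat.mul_comm br c, Nat.mul_add_div hc, Nat.div_eq_of_lt h1, Nat.add_zero]
  have e2 : (br' * c + bc') / c = br' := by
    rw [Nat.mul_comm br' c, Nat.mul_add_div hc, Nat.div_eq_of_lt h2, Nat.add_zero]
  have : br = br' := by rw [← e1, ← e2, h]
  exact ⟨this, by subst this; omega⟩

lemma pv_idx_lt {c br bc : Nat} (hbr : br < c) (hbc : bc < c) : br * c + bc < c * c :=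
  calc br * c + bc < br * c + c := by omega
    _ = (br + 1) * c := by ring
    _ ≤ c * c := Nat.mul_le_mul_right c hbr

lemma pv_inner_getD (grid : List String) (b c i : Nat) (br bc : Nat)
    (hbr : br < c) (hbc : bc < c) (hi : i / b < c) :
    ∀ (l : List Nat) (s : List (List String)), l.Nodup → (∀ x ∈ l, x < c) → s.length = c * c →
      (l.foldl (fun s bc => s.set (i / b * c + bc) (s.getD (i / b * c + bc) [] ++ [pvPiece grid b i bc])) s).getD (br * c + bc) []
        = s.getD (br * c + bc) [] ++ (if i / b = br ∧ bc ∈ l then [pvPiece grid b i bc] else []) := by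
  intro l
  induction l with
  | nil => intro s _ _ _; simp
  | cons x t ih =>
      intro s hnd hlt hs
      have hxc : x < c := hlt x (by simp)
      have hlen' : (s.set (i / b * c + x) (s.getD (i / b * c + x) [] ++ [pvPiece grid b i x])).length = c * c := by
        rw [List.length_set]; exact hs
      rw [List.foldl_cons, ih _ hnd.of_cons (fun y hy => hlt y (by simp [hy])) hlen']
      by_cases hq : i / b * c + x = br * c + bc
      · obtain ⟨hbr', hbc'⟩ := pv_idx_inj hxc hbc hq
        subst hbc'
        have hxt : x ∉ t := (List.nodup_cons.mp hnd).1
        have hin : i / b * c + x < s.length := by rw [hs]; exact pv_idx_lt (hbr' ▸ hi) hxc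
        rw [← hq]
        rw [List.getD_eq_getElem?_getD, List.getElem?_set_self hin]
        simp [hbr', hxt, List.getD_eq_getElem?_getD]
      · have : (s.set (i / b * c + x) (s.getD (i / b * c + x) [] ++ [pvPiece grid b i x])).getD (br * c + bc) [] = s.getD (br * c + bc) [] := by
          rw [List.getD_eq_getElem?_getD, List.getElem?_set_ne hq, ← List.getD_eq_getElem?_getD]
        rw [this]
        have hxbc : ¬ (i / b = br ∧ bc = x) := by
          intro ⟨h1, h2⟩; exact hq (by rw [h1, h2])
        by_cases hc1 : i / b = br
        · have : bc ≠ x := fun h => hxbc ⟨hc1, h⟩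
          simp [hc1, this]
        · simp [hc1]

def pvStep (grid : List String) (b c i : Nat) (s : List (List String)) : List (List String) :=
  (List.range c).foldl
    (fun s bc => s.set (i / b * c + bc) (s.getD (i / b * c + bc) [] ++ [pvPiece grid b i bc])) s

lemma pvStep_getD (grid : List String) (b c i : Nat) (br bc : Nat)
    (hbr : br < c) (hbc : bc < c) (hi : i / b < c) (s : List (List String)) (hs : s.length = c * c) :
    (pvStep grid b c i s).getD (br * c + bc) []
      = s.getD (br * c + bc) [] ++ (if i / b = br then [pvPiece grid b i bc] else []) := by
  have := pv_inner_getD grid b c i br bc hbr hbc hi (List.range c) s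
    (List.nodup_range) (by intro x hx; simpa using hx) hs
  simpa [pvStep, List.mem_range, hbc] using this

def pvLoop (grid : List String) (b c k : Nat) : List (List String) :=
  (List.range k).foldl (fun s i => pvStep grid b c i s) (List.replicate (c * c) ([] : List String))

lemma pv_inner_length (grid : List String) (b c i : Nat) :
    ∀ (l : List Nat) (s : List (List String)),
      (l.foldl (fun s bc => s.set (i / b * c + bc) (s.getD (i / b * c + bc) [] ++ [pvPiece grid b i bc])) s).length
        = s.length := by
  intro l
  induction l with
  | nil => intro s; rfl
  | cons x t ih =>
      intro s
      rw [List.foldl_cons, ih, List.length_set]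

lemma pvLoop_length (grid : List String) (b c k : Nat) : (pvLoop grid b c k).length = c * c := by
  induction k with
  | zero => simp [pvLoop]
  | succ k ih =>
      rw [pvLoop, List.range_succ, List.foldl_append, List.foldl_cons, List.foldl_nil]
      show (pvStep grid b c k _).length = c * c
      rw [pvStep, pv_inner_length]
      exact ih

lemma pvLoop_getD (grid : List String) (b c : Nat) (hb : 0 < b) :
    ∀ k, k ≤ c * b → ∀ br bc, br < c → bc < c →
      (pvLoop grid b c k).getD (br * c + bc) []
        = (List.range (min b (k - br * b))).map (fun r => pvPiece grid b (br * b + r) bc) := by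
  intro k
  induction k with
  | zero =>
      intro _ br bc hbr hbc
      simp [pvLoop, List.getD_eq_getElem?_getD]
  | succ k ih =>
      intro hk br bc hbr hbc
      have hk' : k ≤ c * b := by omega
      have hi : k / b < c := by
        rw [Nat.div_lt_iff_lt_mul hb]; omega
      have hstep : pvLoop grid b c (k + 1) = pvStep grid b c k (pvLoop grid b c k) := by
        rw [pvLoop, List.range_succ, List.foldl_append]; rfl
      rw [hstep, pvStep_getD grid b c k br bc hbr hbc hi _ (pvLoop_length grid b c k),
        ih hk' br bc hbr hbc]
      by_cases h : k / b = br
      · rw [← h]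
        simp only [if_pos rfl]
        have hdm := Nat.div_add_mod k b
        have hrlt : k % b < b := Nat.mod_lt _ hb
        generalize hg : k / b = m at hdm ⊢
        generalize hr0 : k % b = r0 at hdm hrlt ⊢
        simp only [Nat.mul_comm m b]
        generalize hp : b * m = p at hdm ⊢
        have e1 : min b (k - p) = r0 := by omega
        have e2 : min b (k + 1 - p) = r0 + 1 := by omega
        rw [e1, e2, List.range_succ, List.map_append]
        have hk2 : k = p + r0 := by omega
        simp [hk2]
      · rw [if_neg h]
        have hmin : min b (k + 1 - br * b) = min b (k - br * b) := by
          rcases Nat.lt_or_ge br (k / b) with hlt | hge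
          · have h1 : (br + 1) * b ≤ k / b * b := Nat.mul_le_mul_right b hlt
            have h2 : k / b * b ≤ k := Nat.div_mul_le_self k b
            have h3 : br * b + b ≤ k := by
              have : (br + 1) * b = br * b + b := by ring
              omega
            generalize br * b = p at h3 ⊢
            omega
          · have hgt : k / b < br := by omega
            have h1 : (k / b + 1) * b ≤ br * b := Nat.mul_le_mul_right b hgt
            have h2 : k < (k / b + 1) * b := by
              rw [← Nat.div_lt_iff_lt_mul hb]; omega
            have h3 : k + 1 ≤ br * b := by omega
            generalize br * b = p at h3 ⊢
            omega
        rw [hmin, List.append_nil]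

lemma pv_flatMap_getElem? {α β : Type} (m : Nat) (f : β → List α) :
    ∀ (l : List β), (∀ x ∈ l, (f x).length = m) → ∀ q, q < l.length * m →
      (l.flatMap f)[q]? = l[q / m]?.bind (fun x => (f x)[q % m]?) := by
  intro l
  induction l with
  | nil => intro _ q hq; simp at hq
  | cons x t ih =>
      intro hlen q hq
      have hm : 0 < m := by
        rcases Nat.eq_zero_or_pos m with h | h
        · subst h; simp at hq
        · exact h
      rw [List.flatMap_cons]
      by_cases hql : q < m
      · rw [List.getElem?_append_left (by rw [hlen x (by simp)]; exact hql),
          Nat.div_eq_of_lt hql, Nat.mod_eq_of_lt hql]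
        simp
      · have hfx : (f x).length = m := hlen x (by simp)
        obtain ⟨q', rfl⟩ : ∃ q', q = m + q' := ⟨q - m, by omega⟩
        rw [List.getElem?_append_right (by omega)]
        rw [hfx]
        have e1 : (m + q') / m = q' / m + 1 := by
          rw [Nat.add_comm m q', Nat.add_div_right _ hm]
        have e2 : (m + q') % m = q' % m := Nat.add_mod_left m q'
        rw [e1, e2, Nat.add_sub_cancel_left]
        have hq' : q' < t.length * m := by
          have hd : (x :: t).length * m = t.length * m + m := by
            simp [List.length_cons]; ring
          omega
        rw [ih (fun y hy => hlen y (by simp [hy])) q' hq']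
        simp

lemma pv_foldl_fun_congr {A B : Type} (l : List B) (f g : A → B → A)
    (h : ∀ a b, f a b = g a b) (init : A) : l.foldl f init = l.foldl g init := by
  have : f = g := funext fun a => funext fun b => h a b
  rw [this]

lemma pv_A_form (grid : List String) (b : Nat) :
    split_blocks grid (b : Int)
      = (List.range (grid.length / b)).flatMap
          (fun br => (List.range (grid.length / b)).map (fun bc => pvBlk grid b br bc)) := by
  simp only [split_blocks, PySem.Int.floordiv_natCast, PySem.List.pyRange_zero_natCast,
    List.foldl_map]
  refine Eq.trans (pv_foldl_fun_congr _ _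
      (fun out br => out ++ (List.range (grid.length / b)).map (fun bc => pvBlk grid b br bc)) ?_ []) ?_
  · intro out br
    rw [PySem.List.foldl_append_singleton_eq_map]
    congr 1
    apply List.map_congr_left
    intro bc _
    rw [List.map_map]
    unfold pvBlk
    apply List.map_congr_left
    intro r _
    unfold pvPiece
    simp only [Function.comp]
    congr 1 <;> push_cast <;> ring_nf
  · rw [PySem.List.foldl_append_eq_flatMap]
    simp

lemma pv_B_form (grid : List String) (b : Nat) (hc : 0 < grid.length / b) :
    split_blocks_alt grid (b : Int) = pvLoop grid b (grid.length / b) (grid.length / b * b) := by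
  simp only [split_blocks_alt, PySem.Int.floordiv_natCast]
  rw [if_neg (by exact_mod_cast Nat.not_le.mpr hc)]
  rw [show ((grid.length / b : Nat) : Int) * (b : Int) = ((grid.length / b * b : Nat) : Int) by push_cast; ring]
  rw [show ((grid.length / b : Nat) : Int) * ((grid.length / b : Nat) : Int) = ((grid.length / b * (grid.length / b) : Nat) : Int) by push_cast; ring]
  rw [Int.toNat_natCast]
  simp only [PySem.List.pyRange_zero_natCast, List.foldl_map, PySem.Int.floordiv_natCast]
  unfold pvLoop
  refine pv_foldl_fun_congr _ _ _ (fun s i => ?_) _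
  unfold pvStep
  refine pv_foldl_fun_congr _ _ _ (fun s2 bc => ?_) _
  have hidx : (((i / b : Nat) : Int) * ((grid.length / b : Nat) : Int) + (bc : Int)).toNat
      = i / b * (grid.length / b) + bc := by
    rw [show ((i / b : Nat) : Int) * ((grid.length / b : Nat) : Int) + (bc : Int) = ((i / b * (grid.length / b) + bc : Nat) : Int) by push_cast; ring]
    exact Int.toNat_natCast _
  rw [hidx]
  unfold pvPiece
  congr 2 <;> push_cast <;> ring_nf

lemma pv_B_eq_flatMap (grid : List String) (b c : Nat) (hb : 0 < b) (hc : 0 < c) :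
    pvLoop grid b c (c * b)
      = (List.range c).flatMap (fun br => (List.range c).map (fun bc => pvBlk grid b br bc)) := by
  have hlenR : ((List.range c).flatMap (fun br => (List.range c).map (fun bc => pvBlk grid b br bc))).length = c * c := by
    rw [List.length_flatMap]
    simp [List.map_const']
  apply List.ext_getElem?
  intro q
  by_cases hq : q < c * c
  · have hbr : q / c < c := by rw [Nat.div_lt_iff_lt_mul hc]; exact hq
    have hbc : q % c < c := Nat.mod_lt _ hc
    have hqe : q / c * c + q % c = q := by
      have h := Nat.div_add_mod q c
      have hcm : c * (q / c) = q / c * c := Nat.mul_comm c (q / c)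
      omega
    have hblk : (pvLoop grid b c (c * b)).getD q [] = pvBlk grid b (q / c) (q % c) := by
      have h := pvLoop_getD grid b c hb (c * b) (le_refl _) (q / c) (q % c) hbr hbc
      rw [hqe] at h
      rw [h]
      have hmin : min b (c * b - q / c * b) = b := by
        have h1 : (q / c + 1) * b ≤ c * b := Nat.mul_le_mul_right b hbr
        have h2 : (q / c + 1) * b = q / c * b + b := by ring
        generalize q / c * b = p at h1 h2 ⊢
        omega
      rw [hmin]
      rfl
    have hlt : q < (pvLoop grid b c (c * b)).length := by rw [pvLoop_length]; exact hq
    rw [List.getElem?_eq_getElem hlt, ← List.getD_eq_getElem _ _ hlt, hblk]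
    rw [pv_flatMap_getElem? c _ _ (by intro x _; simp [pvBlk]) q (by simpa using hq)]
    rw [List.getElem?_range hbr]
    simp [List.getElem?_map, List.getElem?_range hbc]
  · have h1 : (pvLoop grid b c (c * b))[q]? = none := by
      rw [List.getElem?_eq_none]
      rw [pvLoop_length]; omega
    have h2 : ((List.range c).flatMap (fun br => (List.range c).map (fun bc => pvBlk grid b br bc)))[q]? = none := by
      rw [List.getElem?_eq_none]
      rw [hlenR]; omega
    rw [h1, h2]

lemma pv_cnt_nonpos (n bs : Int) (hn : 0 ≤ n) (hbs : bs < 0) : PySem.Int.floordiv n bs ≤ 0 := by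
  have h1 := PySem.Int.floordiv_mul_add_mod n bs
  have h2 := PySem.Int.mod_neg_bounds (a := n) (b := bs) hbs
  nlinarith [h1, h2.1, h2.2]

lemma pv_A_nil (grid : List String) (bs : Int) (h : PySem.Int.floordiv (grid.length : Int) bs ≤ 0) :
    split_blocks grid bs = [] := by
  simp only [split_blocks]
  rw [PySem.List.pyRange_of_pos 0 (PySem.Int.floordiv (grid.length : Int) bs) (s := 1) (by norm_num)]
  have hnl : ¬ ((0 : Int) < PySem.Int.floordiv (grid.length : Int) bs) := by omega
  rw [if_neg hnl]
  simp

lemma pv_final : ∀ (grid : List String) (bs : Int), bs ≠ 0 → split_blocks grid bs = split_blocks_alt grid bs := by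
  intro grid bs hbs
  rcases lt_trichotomy bs 0 with hneg | hz | hpos
  · have hcnt : PySem.Int.floordiv (grid.length : Int) bs ≤ 0 :=
      pv_cnt_nonpos _ _ (by positivity) hneg
    rw [pv_A_nil grid bs hcnt]
    simp only [split_blocks_alt]
    rw [if_pos hcnt]
  · exact absurd hz hbs
  · obtain ⟨b, rfl⟩ : ∃ b : Nat, bs = (b : Int) := ⟨bs.toNat, (Int.toNat_of_nonneg (le_of_lt hpos)).symm⟩
    have hb : 0 < b := by exact_mod_cast hpos
    by_cases hc : 0 < grid.length / b
    · rw [pv_A_form grid b, pv_B_form grid b hc, pv_B_eq_flatMap grid b _ hb hc]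
    · have hcnt : PySem.Int.floordiv (grid.length : Int) (b : Int) ≤ 0 := by
        rw [PySem.Int.floordiv_natCast]
        omega
      rw [pv_A_nil grid _ hcnt]
      simp only [split_blocks_alt]
      rw [if_pos hcnt]

-- ===== VERDICT (by name: the statement is the Claim_ definition above) =====
theorem split_blocks_spec : Claim_equal_split_blocks := by
  intro grid bs _ hpre
  show split_blocks grid bs = split_blocks_alt grid bs
  exact pv_final grid bs hpre
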